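-- pv_equiv track=rewrite | github.com/dianamory/work_schedule | data.py | add_consecutive_hours
-- ===== SOURCE A (Python) =====
-- def add_consecutive_hours(hour_list):
--     if not hour_list:
--         return hour_list
--
--     hour_list = sorted(hour_list)
--     new_list = []
--
--     for i in range(len(hour_list)):
--         new_list.append(hour_list[i])
--         # Verificar si el número actual no es el último y no tiene consecutivo
--         if (i < len(hour_list) - 1 and hour_list[i] + 1 != hour_list[i + 1]) or (i == len(hour_list) - 1):
--             next_hour = hour_list[i] + 1
--             if next_hour == 25:  # Si la hora es 24, reiniciar a 1
--                 next_hour = 1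
--             new_list.append(next_hour)
--
--     return sorted(set(new_list))
-- ===== SOURCE B (Python) =====
-- def add_consecutive_hours(hour_list):
--     if not hour_list:
--         return hour_list
--     s = set(hour_list)
--     out = set(s)
--     for h in s:
--         if h + 1 not in s:
--             out.add(1 if h + 1 == 25 else h + 1)
--     return sorted(out)
-- ===== Notes on version B (the rewrite author's own statement) =====
-- stated objective: simpler
-- what changed: B replaces A's sort-then-adjacency index scan (building a list with per-index gap checks against the next element, then sorted(set(...))) with direct set-membership gap tests: for each distinct hour h it adds the wrapped h+1 exactly when h+1 is absent from the set.
-- intended difference: On lists containing 24 at least twice together with 25 but neither 0 nor 1, A's duplicate-triggered gap branch fires on the first 24 and injects a spurious wrapped hour 1 into the result, while B omits it; B's value is intended since 25, the consecutive hour of 24, is already present. — e.g. on add_consecutive_hours([24, 24, 25]): A returns [1, 24, 25, 26], B returns [24, 25, 26]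
import Mathlib
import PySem

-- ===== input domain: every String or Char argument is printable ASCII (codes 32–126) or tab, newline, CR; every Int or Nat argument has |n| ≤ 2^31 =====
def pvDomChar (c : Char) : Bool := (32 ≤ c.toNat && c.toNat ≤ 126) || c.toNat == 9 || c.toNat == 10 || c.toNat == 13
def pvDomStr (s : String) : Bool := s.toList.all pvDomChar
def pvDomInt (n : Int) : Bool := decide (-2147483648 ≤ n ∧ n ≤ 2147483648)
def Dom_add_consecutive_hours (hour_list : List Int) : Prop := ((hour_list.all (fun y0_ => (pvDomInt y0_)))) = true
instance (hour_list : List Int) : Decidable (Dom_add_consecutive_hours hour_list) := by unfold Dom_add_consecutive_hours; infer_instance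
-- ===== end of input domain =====

-- B replaces A's sort-then-adjacency index scan with direct set-membership gap tests (objective: simpler);
-- on the duplicate-24-with-25 corner (D_ below) B drops A's spurious wrapped 1.

-- ===== PORT A =====
def add_consecutive_hours (hour_list : List Int) : List Int :=
  if hour_list = [] then hour_list
  else
    let hl := PySem.List.sorted hour_list (fun x => x) false
    let n : Int := (hl.length : Int)
    let new_list : List Int :=
      (PySem.List.pyRange 0 n 1).foldl (fun acc i =>
        let acc := acc ++ [PySem.List.pyGetD hl i 0]
        if (i < n - 1 ∧ PySem.List.pyGetD hl i 0 + 1 ≠ PySem.List.pyGetD hl (i + 1) 0) ∨ i = n - 1 then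
          let next_hour := PySem.List.pyGetD hl i 0 + 1
          let next_hour := if next_hour = 25 then 1 else next_hour
          acc ++ [next_hour]
        else acc) []
    PySem.List.sorted (PySem.Set.ofList new_list) (fun x => x) false

-- ===== PORT B =====
def add_consecutive_hours_alt (hour_list : List Int) : List Int :=
  if hour_list = [] then hour_list
  else
    let s := PySem.Set.ofList hour_list
    let out : PySem.Set Int :=
      s.foldl (fun out h =>
        if ¬ (PySem.Set.contains s (h + 1)) then
          PySem.Set.add out (if h + 1 = 25 then 1 else h + 1)
        else out) (PySem.Set.ofList s)
    PySem.List.sorted out (fun x => x) false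

-- ===== PRECONDITION & SPEC =====
-- On lists holding 24 at least twice together with 25 but neither 0 nor 1, A returns a list that
-- spuriously contains 1 (its duplicate-triggered "gap" branch fires on the first 24 and wraps 25 to 1),
-- while B returns the same list without the 1; B's value is the intended one since 24 has its
-- consecutive hour 25 already present and no run ends at hour 24.
def D_add_consecutive_hours (hour_list : List Int) : Prop :=
  2 ≤ hour_list.count 24 ∧ (25 : Int) ∈ hour_list ∧ (1 : Int) ∉ hour_list ∧ (0 : Int) ∉ hour_list
instance (hour_list : List Int) : Decidable (D_add_consecutive_hours hour_list) := by
  unfold D_add_consecutive_hours; infer_instance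

def Spec_add_consecutive_hours (hour_list : List Int) (out : List Int) : Prop :=
  ¬ D_add_consecutive_hours hour_list → out = add_consecutive_hours_alt hour_list
instance (hour_list : List Int) (out : List Int) : Decidable (Spec_add_consecutive_hours hour_list out) := by
  unfold Spec_add_consecutive_hours; infer_instance

def pvDiffWitness_add_consecutive_hours : List Int := [24, 24, 25]
def pvDiffWitnessOut_add_consecutive_hours : (List Int) × (List Int) := ([1, 24, 25, 26], [24, 25, 26])

-- ===== CLAIM (what is proved, stated in full; the proofs are below) =====
def Claim_unchanged_add_consecutive_hours : Prop := ∀ (hour_list : List Int), Dom_add_consecutive_hours hour_list → Spec_add_consecutive_hours hour_list (add_consecutive_hours hour_list)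
def Claim_changed_add_consecutive_hours : Prop := Dom_add_consecutive_hours (pvDiffWitness_add_consecutive_hours) ∧ D_add_consecutive_hours (pvDiffWitness_add_consecutive_hours) ∧ add_consecutive_hours (pvDiffWitness_add_consecutive_hours) = pvDiffWitnessOut_add_consecutive_hours.1 ∧ add_consecutive_hours_alt (pvDiffWitness_add_consecutive_hours) = pvDiffWitnessOut_add_consecutive_hours.2 ∧ pvDiffWitnessOut_add_consecutive_hours.1 ≠ pvDiffWitnessOut_add_consecutive_hours.2
def Claim_exact_add_consecutive_hours : Prop := ∀ (hour_list : List Int), Dom_add_consecutive_hours hour_list → D_add_consecutive_hours hour_list → add_consecutive_hours hour_list ≠ add_consecutive_hours_alt hour_list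

-- ===== LEMMAS AND PROOFS =====

def wrapH (x : Int) : Int := if x = 25 then 1 else x

def sortedHL (hour_list : List Int) : List Int := PySem.List.sorted hour_list (fun x => x) false

def condA (hl : List Int) (j : Nat) : Prop :=
  (j + 1 < hl.length ∧ hl.getD j 0 + 1 ≠ hl.getD (j + 1) 0) ∨ j + 1 = hl.length

-- membership in B's accumulating set fold
lemma mem_foldl_addIf (s l : List Int) (init : PySem.Set Int) (x : Int) :
    x ∈ l.foldl (fun out h =>
      if ¬ (PySem.Set.contains s (h + 1)) then
        PySem.Set.add out (if h + 1 = 25 then 1 else h + 1)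
      else out) init
    ↔ x ∈ init ∨ ∃ h ∈ l, (h + 1) ∉ s ∧ x = wrapH (h + 1) := by
  induction l generalizing init with
  | nil => simp
  | cons a t ih =>
    simp only [List.foldl_cons]
    by_cases hc : (a + 1) ∈ s
    · rw [if_neg (by simpa using hc)]
      rw [ih]
      constructor
      · rintro (h1 | ⟨h, hh, hns, hx⟩)
        · exact Or.inl h1
        · exact Or.inr ⟨h, List.mem_cons_of_mem _ hh, hns, hx⟩
      · rintro (h1 | ⟨h, hh, hns, hx⟩)
        · exact Or.inl h1
        · rcases List.mem_cons.mp hh with rfl | hh'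
          · exact absurd hc hns
          · exact Or.inr ⟨h, hh', hns, hx⟩
    · rw [if_pos (by simpa using hc)]
      rw [ih]
      simp only [PySem.Set.mem_add]
      constructor
      · rintro ((h1 | h1) | ⟨h, hh, hns, hx⟩)
        · exact Or.inl h1
        · exact Or.inr ⟨a, List.mem_cons_self, hc, by simpa [wrapH] using h1⟩
        · exact Or.inr ⟨h, List.mem_cons_of_mem _ hh, hns, hx⟩
      · rintro (h1 | ⟨h, hh, hns, hx⟩)
        · exact Or.inl (Or.inl h1)
        · rcases List.mem_cons.mp hh with rfl | hh'
          · exact Or.inl (Or.inr (by simpa [wrapH] using hx))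
          · exact Or.inr ⟨h, hh', hns, hx⟩

lemma nodup_foldl_addIf (s l : List Int) (init : PySem.Set Int) (hn : init.Nodup) :
    (l.foldl (fun out h =>
      if ¬ (PySem.Set.contains s (h + 1)) then
        PySem.Set.add out (if h + 1 = 25 then 1 else h + 1)
      else out) init).Nodup := by
  induction l generalizing init with
  | nil => exact hn
  | cons a t ih =>
    simp only [List.foldl_cons]
    split
    · exact ih _ (PySem.Set.nodup_add _ _ hn)
    · exact ih _ hn

lemma memB_char (hour_list : List Int) (hne : hour_list ≠ []) (x : Int) :
    x ∈ add_consecutive_hours_alt hour_list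
    ↔ x ∈ hour_list ∨ ∃ h ∈ hour_list, (h + 1) ∉ hour_list ∧ x = wrapH (h + 1) := by
  unfold add_consecutive_hours_alt
  rw [if_neg hne]
  simp only [PySem.List.mem_sorted]
  rw [mem_foldl_addIf]
  constructor
  · rintro (h1 | ⟨h, hh, hns, hx⟩)
    · exact Or.inl ((PySem.Set.mem_ofList _ _).mp ((PySem.Set.mem_ofList _ _).mp h1))
    · exact Or.inr ⟨h, (PySem.Set.mem_ofList _ _).mp hh,
        fun hc => hns ((PySem.Set.mem_ofList _ _).mpr hc), hx⟩
  · rintro (h1 | ⟨h, hh, hns, hx⟩)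
    · exact Or.inl ((PySem.Set.mem_ofList _ _).mpr ((PySem.Set.mem_ofList _ _).mpr h1))
    · exact Or.inr ⟨h, (PySem.Set.mem_ofList _ _).mpr hh,
        fun hc => hns ((PySem.Set.mem_ofList _ _).mp hc), hx⟩

lemma nodupB (hour_list : List Int) (hne : hour_list ≠ []) :
    (add_consecutive_hours_alt hour_list).Nodup := by
  unfold add_consecutive_hours_alt
  rw [if_neg hne]
  exact ((PySem.List.sorted_perm
      ((PySem.Set.ofList hour_list).foldl (fun out h =>
        if ¬ (PySem.Set.contains (PySem.Set.ofList hour_list) (h + 1)) then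
          PySem.Set.add out (if h + 1 = 25 then 1 else h + 1)
        else out) (PySem.Set.ofList (PySem.Set.ofList hour_list))) (fun x => x) false).symm).nodup
    (nodup_foldl_addIf (PySem.Set.ofList hour_list) (PySem.Set.ofList hour_list)
      (PySem.Set.ofList (PySem.Set.ofList hour_list)) (PySem.Set.nodup_ofList _))

lemma foldA (hl : List Int) (n : Int) (l : List Int) (acc : List Int) :
    l.foldl (fun acc i =>
      let acc := acc ++ [PySem.List.pyGetD hl i 0]
      if (i < n - 1 ∧ PySem.List.pyGetD hl i 0 + 1 ≠ PySem.List.pyGetD hl (i + 1) 0) ∨ i = n - 1 then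
        let next_hour := PySem.List.pyGetD hl i 0 + 1
        let next_hour := if next_hour = 25 then 1 else next_hour
        acc ++ [next_hour]
      else acc) acc
    = acc ++ l.flatMap (fun i =>
        [PySem.List.pyGetD hl i 0] ++
        (if (i < n - 1 ∧ PySem.List.pyGetD hl i 0 + 1 ≠ PySem.List.pyGetD hl (i + 1) 0) ∨ i = n - 1 then
          [if PySem.List.pyGetD hl i 0 + 1 = 25 then 1 else PySem.List.pyGetD hl i 0 + 1]
        else [])) := by
  induction l generalizing acc with
  | nil => simp
  | cons a t ih =>
    simp only [List.foldl_cons, List.flatMap_cons]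
    rw [ih]
    split <;> simp

lemma memA_char (hour_list : List Int) (hne : hour_list ≠ []) (x : Int) :
    x ∈ add_consecutive_hours hour_list
    ↔ x ∈ hour_list ∨ ∃ j : Nat, j < (sortedHL hour_list).length ∧ condA (sortedHL hour_list) j ∧
        x = wrapH ((sortedHL hour_list).getD j 0 + 1) := by
  unfold add_consecutive_hours
  rw [if_neg hne]
  unfold condA sortedHL
  simp only [PySem.List.mem_sorted]
  rw [PySem.Set.mem_ofList, foldA, List.nil_append, List.mem_flatMap]
  have hL1 : 1 ≤ (PySem.List.sorted hour_list (fun x => x) false).length := by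
    have h0 : PySem.List.sorted hour_list (fun x => x) false ≠ [] := by
      rw [Ne, PySem.List.sorted_eq_nil_iff]; exact hne
    cases h : PySem.List.sorted hour_list (fun x => x) false with
    | nil => exact absurd h h0
    | cons a t => simp
  constructor
  · rintro ⟨i, hi, hx⟩
    obtain ⟨hi0, hilt⟩ := (PySem.List.mem_pyRange_one).mp hi
    have hjlt : i.toNat < (PySem.List.sorted hour_list (fun x => x) false).length := by omega
    have hget : PySem.List.pyGetD (PySem.List.sorted hour_list (fun x => x) false) i 0 =
        (PySem.List.sorted hour_list (fun x => x) false).getD i.toNat 0 := by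
      rw [PySem.List.pyGetD_eq_getElem _ _ hi0 hilt, List.getD_eq_getElem _ _ hjlt]
    rcases List.mem_append.mp hx with hx1 | hx2
    · left
      rw [List.mem_singleton] at hx1
      rw [hx1, hget, List.getD_eq_getElem _ _ hjlt]
      exact (PySem.List.mem_sorted hour_list (fun y : Int => y) false _).mp (List.getElem_mem _)
    · by_cases hC : (i < (↑(PySem.List.sorted hour_list (fun x => x) false).length : Int) - 1 ∧
          PySem.List.pyGetD (PySem.List.sorted hour_list (fun x => x) false) i 0 + 1 ≠
            PySem.List.pyGetD (PySem.List.sorted hour_list (fun x => x) false) (i + 1) 0) ∨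
          i = (↑(PySem.List.sorted hour_list (fun x => x) false).length : Int) - 1
      · rw [if_pos hC, List.mem_singleton] at hx2
        right
        refine ⟨i.toNat, hjlt, ?_, by rw [hx2, ← hget, wrapH]⟩
        rcases hC with ⟨hlt, hneq⟩ | heq
        · left
          have hjlt1 : i.toNat + 1 < (PySem.List.sorted hour_list (fun x => x) false).length := by omega
          have hget2 : PySem.List.pyGetD (PySem.List.sorted hour_list (fun x => x) false) (i + 1) 0 =
              (PySem.List.sorted hour_list (fun x => x) false).getD (i.toNat + 1) 0 := by
            rw [PySem.List.pyGetD_eq_getElem _ _ (by omega) (by omega),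
              List.getD_eq_getElem _ _ hjlt1]
            congr 1
            omega
          exact ⟨hjlt1, by rw [← hget, ← hget2]; exact hneq⟩
        · right; omega
      · rw [if_neg hC] at hx2
        simp at hx2
  · rintro (hx | ⟨j, hj, hca, hx⟩)
    · obtain ⟨j, hj, hjx⟩ := List.mem_iff_getElem.mp
        ((PySem.List.mem_sorted hour_list (fun y : Int => y) false x).mpr hx)
      refine ⟨(j : Int), (PySem.List.mem_pyRange_one).mpr (by omega), ?_⟩
      apply List.mem_append.mpr
      left
      rw [List.mem_singleton, PySem.List.pyGetD_eq_getElem _ _ (by omega) (by omega)]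
      simp only [Int.toNat_natCast]
      exact hjx.symm
    · refine ⟨(j : Int), (PySem.List.mem_pyRange_one).mpr (by omega), ?_⟩
      have hget : PySem.List.pyGetD (PySem.List.sorted hour_list (fun x => x) false) (j : Int) 0 =
          (PySem.List.sorted hour_list (fun x => x) false).getD j 0 := by
        rw [PySem.List.pyGetD_eq_getElem _ _ (by omega) (by omega),
          List.getD_eq_getElem _ _ hj]
        simp
      apply List.mem_append.mpr
      right
      rcases hca with ⟨hlt, hneq⟩ | heq
      · have hget2 : PySem.List.pyGetD (PySem.List.sorted hour_list (fun x => x) false) ((j : Int) + 1) 0 =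
            (PySem.List.sorted hour_list (fun x => x) false).getD (j + 1) 0 := by
          rw [PySem.List.pyGetD_eq_getElem _ _ (by omega) (by omega)]
          simp only [show ((j : Int) + 1).toNat = j + 1 from by omega]
          rw [List.getD_eq_getElem _ _ hlt]
        rw [if_pos (Or.inl ⟨by omega, by rw [hget, hget2]; exact hneq⟩), List.mem_singleton]
        simp [hget, hx, wrapH]
      · rw [if_pos (Or.inr (by omega)), List.mem_singleton]
        simp [hget, hx, wrapH]

-- monotonicity of the sorted list, getD form
lemma sortedHL_mono (hour_list : List Int) (p q : Nat) (hpq : p ≤ q)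
    (hq : q < (sortedHL hour_list).length) :
    (sortedHL hour_list).getD p 0 ≤ (sortedHL hour_list).getD q 0 := by
  unfold sortedHL at *
  rw [List.getD_eq_getElem _ _ (lt_of_le_of_lt hpq hq), List.getD_eq_getElem _ _ hq]
  exact PySem.List.sorted_id_getElem_mono _ hpq hq

lemma count_two_of_dup (hour_list : List Int) (j : Nat)
    (hj1 : j + 1 < (sortedHL hour_list).length)
    (ha : (sortedHL hour_list).getD j 0 = 24) (hb : (sortedHL hour_list).getD (j + 1) 0 = 24) :
    2 ≤ hour_list.count 24 := by
  have hperm : (sortedHL hour_list).Perm hour_list := PySem.List.sorted_perm _ _ _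
  rw [← hperm.count 24]
  set hl := sortedHL hour_list with hhl
  rw [show hl = hl.take (j + 1) ++ hl.drop (j + 1) from (List.take_append_drop _ _).symm,
    List.count_append]
  have h1 : (24 : Int) ∈ hl.take (j + 1) := by
    have hjl : j < hl.length := by omega
    have hth : (hl.take (j + 1))[j]'(by simp; omega) = hl[j] := by simp
    rw [List.getD_eq_getElem _ _ hjl] at ha
    exact ha ▸ hth ▸ List.getElem_mem _
  have h2 : (24 : Int) ∈ hl.drop (j + 1) := by
    have hth : (hl.drop (j + 1))[0]'(by simp; omega) = hl[j + 1] := by simp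
    rw [List.getD_eq_getElem _ _ hj1] at hb
    exact hb ▸ hth ▸ List.getElem_mem _
  have c1 := List.count_pos_iff.mpr h1
  have c2 := List.count_pos_iff.mpr h2
  omega

-- two adjacent equal entries in the sorted list from a count of at least two
lemma pair_indices (a : Int) (l : List Int) (h : List.Sublist [a, a] l) :
    ∃ j k : Nat, j < k ∧ k < l.length ∧ l.getD j 0 = a ∧ l.getD k 0 = a := by
  induction l with
  | nil => simp at h
  | cons b t ih =>
    cases h with
    | cons _ h' =>
      obtain ⟨j, k, hjk, hk, ha, hb⟩ := ih h'
      exact ⟨j + 1, k + 1, by omega, by simp; omega,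
        by rw [List.getD_cons_succ]; exact ha, by rw [List.getD_cons_succ]; exact hb⟩
    | cons₂ _ h' =>
      obtain ⟨k, hk, hkx⟩ := List.mem_iff_getElem.mp (List.mem_of_cons_sublist h')
      refine ⟨0, k + 1, by omega, by simp; omega, by simp, ?_⟩
      rw [List.getD_cons_succ, List.getD_eq_getElem _ _ hk]
      exact hkx

lemma dup_adjacent (hour_list : List Int) (hc2 : 2 ≤ hour_list.count 24) :
    ∃ j : Nat, j + 1 < (sortedHL hour_list).length ∧
      (sortedHL hour_list).getD j 0 = 24 ∧ (sortedHL hour_list).getD (j + 1) 0 = 24 := by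
  have hperm : (sortedHL hour_list).Perm hour_list := PySem.List.sorted_perm _ _ _
  have hc2' : 2 ≤ (sortedHL hour_list).count 24 := by rw [hperm.count 24]; exact hc2
  have hsub : List.Sublist (List.replicate 2 (24 : Int)) (sortedHL hour_list) :=
    List.replicate_sublist_iff.mpr hc2'
  obtain ⟨j, k, hjk, hk, ha, hb⟩ := pair_indices 24 (sortedHL hour_list)
    (by simpa [List.replicate] using hsub)
  have h1 : j + 1 ≤ k := by omega
  have hm1 : (sortedHL hour_list).getD j 0 ≤ (sortedHL hour_list).getD (j + 1) 0 :=
    sortedHL_mono hour_list j (j + 1) (by omega) (by omega)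
  have hm2 : (sortedHL hour_list).getD (j + 1) 0 ≤ (sortedHL hour_list).getD k 0 :=
    sortedHL_mono hour_list (j + 1) k h1 hk
  exact ⟨j, by omega, ha, by omega⟩

-- the heart: A's gap-scan contributions coincide with B's set-gap contributions outside D_
lemma core_iff (hour_list : List Int) (hnd : ¬ D_add_consecutive_hours hour_list) (x : Int) :
    (x ∈ hour_list ∨ ∃ j : Nat, j < (sortedHL hour_list).length ∧ condA (sortedHL hour_list) j ∧
        x = wrapH ((sortedHL hour_list).getD j 0 + 1))
    ↔ (x ∈ hour_list ∨ ∃ h ∈ hour_list, (h + 1) ∉ hour_list ∧ x = wrapH (h + 1)) := by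
  have hmemhl : ∀ y : Int, y ∈ sortedHL hour_list ↔ y ∈ hour_list := fun y =>
    PySem.List.mem_sorted _ _ _ _
  constructor
  · rintro (hx | ⟨j, hj, hca, hx⟩)
    · exact Or.inl hx
    set hl := sortedHL hour_list with hhl
    set h := hl.getD j 0 with hh
    have hhmem : h ∈ hour_list := by
      rw [← hmemhl, hh, List.getD_eq_getElem _ _ hj]
      exact List.getElem_mem _
    rcases hca with ⟨hlt, hneq⟩ | hlast
    · by_cases hdup : hl.getD (j + 1) 0 = h
      · -- duplicate: A adds wrapH (h+1) whether or not h+1 is present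
        by_cases hin : (h + 1) ∈ hour_list
        · by_cases h25 : h + 1 = 25
          · -- h = 24, x = 1: use ¬D_
            have h24 : h = 24 := by omega
            have hc2 : 2 ≤ hour_list.count 24 := count_two_of_dup hour_list j hlt
              (by exact h24) (by rw [hdup]; exact h24)
            have h25in : (25 : Int) ∈ hour_list := by rw [← h25]; exact hin
            unfold D_add_consecutive_hours at hnd
            push Not at hnd
            have hx1 : x = 1 := by rw [hx, h25]; simp [wrapH]
            rcases Classical.em ((1 : Int) ∈ hour_list) with h1 | h1
            · exact Or.inl (hx1 ▸ h1)
            · have h0 : (0 : Int) ∈ hour_list := hnd hc2 h25in h1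
              exact Or.inr ⟨0, h0, by simpa using h1, by rw [hx1]; simp [wrapH]⟩
          · -- x = h + 1 is itself a member
            left
            rw [hx, wrapH, if_neg h25]
            exact hin
        · exact Or.inr ⟨h, hhmem, hin, hx⟩
      · -- a genuine gap: h + 1 is not a member
        have hle : h ≤ hl.getD (j + 1) 0 := sortedHL_mono hour_list j (j + 1) (by omega) hlt
        have hgt : h + 1 < hl.getD (j + 1) 0 := by
          have hne2 : h + 1 ≠ hl.getD (j + 1) 0 := by rw [hh]; exact hneq
          have hne3 : hl.getD (j + 1) 0 ≠ h := hdup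
          omega
        refine Or.inr ⟨h, hhmem, ?_, hx⟩
        intro hin
        obtain ⟨k, hk, hkx⟩ := List.mem_iff_getElem.mp ((hmemhl _).mpr hin)
        by_cases hkj : k ≤ j
        · have hmo : hl.getD k 0 ≤ hl.getD j 0 := sortedHL_mono hour_list k j hkj (by omega)
          rw [List.getD_eq_getElem _ _ hk, hkx, ← hh] at hmo
          omega
        · have hmo : hl.getD (j + 1) 0 ≤ hl.getD k 0 :=
            sortedHL_mono hour_list (j + 1) k (by omega) hk
          rw [List.getD_eq_getElem _ _ hk, hkx] at hmo
          omega
    · -- last index: h is the maximum, so h + 1 is not a member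
      refine Or.inr ⟨h, hhmem, ?_, hx⟩
      intro hin
      obtain ⟨k, hk, hkx⟩ := List.mem_iff_getElem.mp ((hmemhl _).mpr hin)
      have hmo : hl.getD k 0 ≤ hl.getD j 0 := sortedHL_mono hour_list k j (by omega) hj
      rw [List.getD_eq_getElem _ _ hk, hkx, ← hh] at hmo
      omega
  · rintro (hx | ⟨h, hh, hnin, hx⟩)
    · exact Or.inl hx
    obtain ⟨j, hj, hjx⟩ := List.mem_iff_getElem.mp ((hmemhl h).mpr hh)
    right
    refine ⟨j, hj, ?_, by rw [List.getD_eq_getElem _ _ hj, hjx]; exact hx⟩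
    by_cases hj1 : j + 1 = (sortedHL hour_list).length
    · exact Or.inr hj1
    · left
      refine ⟨by omega, ?_⟩
      rw [List.getD_eq_getElem _ _ hj, hjx]
      intro heq
      apply hnin
      rw [← hmemhl _, heq, List.getD_eq_getElem _ _ (by omega : j + 1 < (sortedHL hour_list).length)]
      exact List.getElem_mem _

lemma pairwiseA (hour_list : List Int) (hne : hour_list ≠ []) :
    (add_consecutive_hours hour_list).Pairwise (· < ·) := by
  unfold add_consecutive_hours
  rw [if_neg hne]
  exact PySem.List.sorted_ofList_pairwise_lt _

lemma pairwiseB (hour_list : List Int) (hne : hour_list ≠ []) :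
    (add_consecutive_hours_alt hour_list).Pairwise (· < ·) := by
  have hle : (add_consecutive_hours_alt hour_list).Pairwise (· ≤ ·) := by
    unfold add_consecutive_hours_alt
    rw [if_neg hne]
    exact PySem.List.sorted_pairwise _ _
  exact (List.Pairwise.and hle (nodupB hour_list hne)).imp fun hab => lt_of_le_of_ne hab.1 hab.2

-- two strictly increasing lists with the same members are equal
lemma eq_of_mem_iff (l₁ l₂ : List Int) (h1 : l₁.Pairwise (· < ·)) (h2 : l₂.Pairwise (· < ·))
    (hm : ∀ x, x ∈ l₁ ↔ x ∈ l₂) : l₁ = l₂ := by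
  have hn1 : l₁.Nodup := h1.imp ne_of_lt
  have hn2 : l₂.Nodup := h2.imp ne_of_lt
  exact List.Perm.eq_of_pairwise (fun a b _ _ hab hba => le_antisymm (le_of_lt hab) (le_of_lt hba) )
    h1 h2 ((List.perm_ext_iff_of_nodup hn1 hn2).mpr hm)

-- ===== VERDICT (by name: the statement is the Claim_ definition above) =====
theorem add_consecutive_hours_spec : Claim_unchanged_add_consecutive_hours := by
  intro hour_list _ hnd
  by_cases hne : hour_list = []
  · subst hne; rfl
  · exact eq_of_mem_iff _ _ (pairwiseA hour_list hne) (pairwiseB hour_list hne)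
      (fun x => ((memA_char hour_list hne x).trans (core_iff hour_list hnd x)).trans
        (memB_char hour_list hne x).symm)

theorem add_consecutive_hours_changed : Claim_changed_add_consecutive_hours := by
  unfold Claim_changed_add_consecutive_hours; decide

theorem add_consecutive_hours_tight : Claim_exact_add_consecutive_hours := by
  intro hour_list _ hd
  obtain ⟨hc2, h25, h1, h0⟩ := hd
  have hne : hour_list ≠ [] := by rintro rfl; simp at h25
  intro heq
  obtain ⟨j, hj1, ha24, hb24⟩ := dup_adjacent hour_list hc2
  have h1A : (1 : Int) ∈ add_consecutive_hours hour_list := by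
    rw [memA_char hour_list hne]
    exact Or.inr ⟨j, by omega, Or.inl ⟨hj1, by rw [ha24, hb24]; omega⟩,
      by rw [ha24]; simp [wrapH]⟩
  have h1B : (1 : Int) ∉ add_consecutive_hours_alt hour_list := by
    rw [memB_char hour_list hne]
    rintro (hmem | ⟨h, hh, hnin, hx⟩)
    · exact h1 hmem
    · by_cases hcase : h + 1 = 25
      · exact hnin (by rw [hcase]; exact h25)
      · rw [wrapH, if_neg hcase] at hx
        exact h0 (by have hzero : h = 0 := by omega
                     rwa [hzero] at hh)
  exact h1B (heq ▸ h1A)
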